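-- pv_equiv track=rewrite | github.com/Bright-Starlight/PlotPilot | application/blueprint/services/beat_calculator.py | calculate_words_per_beat
-- ===== SOURCE A (Python) =====
-- from typing import List
--
-- def calculate_words_per_beat(
--     target_words_per_chapter: int,
--     beat_count: int
-- ) -> List[int]:
--     """计算每个节拍的目标字数
--
--     Args:
--         target_words_per_chapter: 目标章节字数
--         beat_count: 节拍数量
--
--     Returns:
--         每个节拍的目标字数列表
--
--     Example:
--         calculate_words_per_beat(3500, 4) -> [875, 875, 875, 875]
--         calculate_words_per_beat(3502, 4) -> [876, 876, 875, 875]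
--     """
--     if beat_count <= 0:
--         return []
--
--     # 平均分配
--     avg_words = target_words_per_chapter // beat_count
--     remainder = target_words_per_chapter % beat_count
--
--     # 前面的节拍多分配余数
--     words_per_beat = [avg_words] * beat_count
--     for i in range(remainder):
--         words_per_beat[i] += 1
--
--     return words_per_beat
-- ===== SOURCE B (Python) =====
-- from typing import List
--
-- def calculate_words_per_beat(
--     target_words_per_chapter: int,
--     beat_count: int
-- ) -> List[int]:
--     if beat_count <= 0:
--         return []
--     # beat i receives ceil((target - i) / beat_count), computed as a floor division;
--     # no average/remainder is ever computed and each entry is independent of the others.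
--     return [
--         (target_words_per_chapter - i + beat_count - 1) // beat_count
--         for i in range(beat_count)
--     ]
-- ===== Notes on version B (the rewrite author's own statement) =====
-- stated objective: alternative
-- what changed: B computes each beat independently by the per-index ceiling formula (target - i + beat_count - 1) // beat_count over range(beat_count), never computing the average, the remainder, or any block/increment structure that A's two-phase fill-then-increment uses.
import Mathlib
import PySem

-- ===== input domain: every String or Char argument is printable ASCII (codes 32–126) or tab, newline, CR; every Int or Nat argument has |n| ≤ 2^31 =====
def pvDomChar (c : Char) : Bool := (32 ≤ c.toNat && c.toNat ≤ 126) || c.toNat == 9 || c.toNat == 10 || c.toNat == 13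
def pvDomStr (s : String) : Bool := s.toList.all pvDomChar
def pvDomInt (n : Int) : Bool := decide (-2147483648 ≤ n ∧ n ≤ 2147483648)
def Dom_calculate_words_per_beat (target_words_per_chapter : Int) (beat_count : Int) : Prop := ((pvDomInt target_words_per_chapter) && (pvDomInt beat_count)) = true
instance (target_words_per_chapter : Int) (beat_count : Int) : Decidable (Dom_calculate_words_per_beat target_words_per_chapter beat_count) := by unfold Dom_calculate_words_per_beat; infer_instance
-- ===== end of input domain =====

-- ===== PORT A =====
-- B replaces A's divmod fill-then-increment construction by an independent per-index
-- ceiling-share formula (objective: alternative, same cost).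
def calculate_words_per_beat (target_words_per_chapter : Int) (beat_count : Int) : List Int :=
  if beat_count ≤ 0 then []
  else
    let avg_words := PySem.Int.floordiv target_words_per_chapter beat_count
    let remainder := PySem.Int.mod target_words_per_chapter beat_count
    let words_per_beat := List.replicate beat_count.toNat avg_words
    (PySem.List.pyRange 0 remainder 1).foldl
      (fun l i => l.set i.toNat (l.getD i.toNat 0 + 1)) words_per_beat

-- ===== PORT B =====
def calculate_words_per_beat_alt (target_words_per_chapter : Int) (beat_count : Int) : List Int :=
  if beat_count ≤ 0 then []
  else
    (PySem.List.pyRange 0 beat_count 1).map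
      (fun i => PySem.Int.floordiv (target_words_per_chapter - i + beat_count - 1) beat_count)

-- ===== PRECONDITION & SPEC =====
def Spec_calculate_words_per_beat (target_words_per_chapter : Int) (beat_count : Int) (out : List Int) : Prop := out = calculate_words_per_beat_alt target_words_per_chapter beat_count
instance (target_words_per_chapter : Int) (beat_count : Int) (out : List Int) : Decidable (Spec_calculate_words_per_beat target_words_per_chapter beat_count out) := by unfold Spec_calculate_words_per_beat; infer_instance

-- ===== CLAIM =====
def Claim_equal_calculate_words_per_beat : Prop := ∀ (target_words_per_chapter : Int) (beat_count : Int), Dom_calculate_words_per_beat target_words_per_chapter beat_count → Spec_calculate_words_per_beat target_words_per_chapter beat_count (calculate_words_per_beat target_words_per_chapter beat_count)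

-- ===== LEMMAS AND PROOFS =====

-- Incrementing the first k entries of a uniform list, one index at a time, yields two blocks.
theorem foldl_incr_replicate (v : Int) :
    ∀ (k n : Nat), k ≤ n →
      (List.range k).foldl (fun l i => l.set i (l.getD i 0 + 1)) (List.replicate n v)
        = List.replicate k (v + 1) ++ List.replicate (n - k) v := by
  intro k
  induction k with
  | zero => intro n _; simp
  | succ k ih =>
    intro n hk
    have hkn : k < n := by omega
    rw [List.range_succ, List.foldl_append, ih n (by omega)]
    simp only [List.foldl_cons, List.foldl_nil]
    have hrep : List.replicate (n - k) v = v :: List.replicate (n - (k + 1)) v := by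
      have : n - k = (n - (k + 1)) + 1 := by omega
      rw [this, List.replicate_succ]
    rw [hrep]
    have hlen : (List.replicate k (v + 1)).length = k := List.length_replicate
    rw [List.getD_append_right _ _ _ _ (le_of_eq hlen), List.set_append_right _ _ (le_of_eq hlen)]
    simp [hlen, List.replicate_succ' (n := k)]

-- A's result, for positive beat_count, is the two-block list.
theorem a_eq_blocks (t b : Int) (hb : 0 < b) :
    calculate_words_per_beat t b
      = List.replicate (PySem.Int.mod t b).toNat (PySem.Int.floordiv t b + 1)
        ++ List.replicate (b - PySem.Int.mod t b).toNat (PySem.Int.floordiv t b) := by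
  unfold calculate_words_per_beat
  simp only [if_neg (by omega : ¬ b ≤ 0)]
  set r := PySem.Int.mod t b with hr
  have hre : r = t % b := by rw [hr, PySem.Int.mod_eq_emod_of_pos hb]
  have hr0 : 0 ≤ r := by rw [hre]; exact Int.emod_nonneg t (by omega)
  have hrb : r < b := by rw [hre]; exact Int.emod_lt_of_pos t hb
  rw [PySem.List.pyRange_one, List.foldl_map]
  have := foldl_incr_replicate (PySem.Int.floordiv t b) ((r - 0).toNat) b.toNat (by omega)
  simp only [Int.sub_zero] at this ⊢
  have hfun : (fun (l : List Int) (k : Nat) => l.set ((0 : Int) + ↑k).toNat (l.getD ((0 : Int) + ↑k).toNat 0 + 1))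
      = fun (l : List Int) (k : Nat) => l.set k (l.getD k 0 + 1) := by
    funext l k; simp
  rw [hfun, this]
  congr 2
  omega

-- The per-index ceiling share equals avg+1 on the first remainder indices and avg after.
theorem ceil_share_eq (t b : Int) (hb : 0 < b) (k : Nat) (hk : (k : Int) < b) :
    PySem.Int.floordiv (t - k + b - 1) b
      = if (k : Int) < PySem.Int.mod t b then PySem.Int.floordiv t b + 1
        else PySem.Int.floordiv t b := by
  have hqr := PySem.Int.floordiv_mul_add_mod t b
  set q := PySem.Int.floordiv t b
  set r := PySem.Int.mod t b
  have hre : r = t % b := PySem.Int.mod_eq_emod_of_pos hb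
  have hr0 : 0 ≤ r := by rw [hre]; exact Int.emod_nonneg t (by omega)
  have hrb : r < b := by rw [hre]; exact Int.emod_lt_of_pos t hb
  by_cases hc : (k : Int) < r
  · rw [if_pos hc, (PySem.Int.floordiv_eq_iff_of_pos hb)]
    constructor <;> nlinarith
  · rw [if_neg hc, (PySem.Int.floordiv_eq_iff_of_pos hb)]
    rw [not_lt] at hc
    constructor <;> nlinarith

theorem calculate_words_per_beat_eq (t b : Int) :
    calculate_words_per_beat t b = calculate_words_per_beat_alt t b := by
  by_cases hb : b ≤ 0
  · unfold calculate_words_per_beat calculate_words_per_beat_alt; simp [hb]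
  · have hbpos : 0 < b := by omega
    rw [a_eq_blocks t b hbpos]
    unfold calculate_words_per_beat_alt
    simp only [if_neg hb]
    rw [PySem.List.pyRange_one, List.map_map]
    set q := PySem.Int.floordiv t b
    set r := PySem.Int.mod t b with hr
    have hre : r = t % b := by rw [hr, PySem.Int.mod_eq_emod_of_pos hbpos]
    have hr0 : 0 ≤ r := by rw [hre]; exact Int.emod_nonneg t (by omega)
    have hrb : r < b := by rw [hre]; exact Int.emod_lt_of_pos t hbpos
    apply List.ext_getElem
    · simp; omega
    · intro i h1 h2
      have hib : i < b.toNat := by simpa using h2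
      have hibZ : (i : Int) < b := by omega
      rw [List.getElem_map, List.getElem_range]
      simp only [Function.comp, Int.zero_add]
      rw [ceil_share_eq t b hbpos i hibZ]
      by_cases hir : (i : Int) < r
      · rw [if_pos hir, List.getElem_append_left (by simp; omega)]
        simp only [List.getElem_replicate]; rfl
      · rw [if_neg hir, List.getElem_append_right (by simp; omega)]
        simp only [List.getElem_replicate]; rfl

-- ===== VERDICT =====
theorem calculate_words_per_beat_spec : Claim_equal_calculate_words_per_beat := by
  intro t b _
  unfold Spec_calculate_words_per_beat
  exact calculate_words_per_beat_eq t b
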